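-- pv_equiv track=rewrite | github.com/Xgswlg/TGLS | src/train.py | get_tok2char_span_map
-- ===== SOURCE A (Python) =====
-- def get_tok2char_span_map(text):
--     tokens = text.split(" ")
--     tok2char_span = []
--     char_num = 0
--     for tok in tokens:
--         tok2char_span.append((char_num, char_num + len(tok)))
--         char_num += len(tok) + 1  # +1: whitespace
--     return tok2char_span
-- ===== SOURCE B (Python) =====
-- def get_tok2char_span_map(text):
--     # Single scan over the characters instead of split(" ") + token loop.
--     spans = []
--     start = 0
--     for i, ch in enumerate(text):
--         if ch == " ":
--             spans.append((start, i))
--             start = i + 1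
--     spans.append((start, len(text)))
--     return spans
-- ===== Notes on version B (the rewrite author's own statement) =====
-- stated objective: alternative
-- what changed: B drops the split-on-single-space call and the token loop entirely: one enumerate scan over the characters emits a span at each space character and a final trailing span, instead of splitting into tokens and accumulating offsets from token lengths.
import Mathlib
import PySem

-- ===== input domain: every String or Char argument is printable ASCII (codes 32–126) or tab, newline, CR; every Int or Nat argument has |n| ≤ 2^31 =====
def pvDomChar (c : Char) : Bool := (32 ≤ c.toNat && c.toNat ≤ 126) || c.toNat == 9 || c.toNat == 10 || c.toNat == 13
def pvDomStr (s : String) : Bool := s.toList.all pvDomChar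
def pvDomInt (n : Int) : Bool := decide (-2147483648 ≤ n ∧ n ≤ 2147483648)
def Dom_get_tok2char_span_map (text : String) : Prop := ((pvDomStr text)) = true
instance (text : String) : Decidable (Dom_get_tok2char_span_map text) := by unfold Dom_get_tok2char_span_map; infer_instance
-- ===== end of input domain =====

-- B replaces the split-on-single-space + token loop by one direct scan over the characters (same output; objective: alternative decomposition).

-- ===== PORT A =====
def get_tok2char_span_map (text : String) : List (Int × Int) :=
  -- text.split(" "): sep is non-empty, so split never raises; PySem.Chars.splitOn is that case
  let tokens := PySem.Chars.splitOn text.toList [' ']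
  let res := tokens.foldl
    (fun (st : List (Int × Int) × Int) tok =>
      (st.1 ++ [(st.2, st.2 + (tok.length : Int))], st.2 + (tok.length : Int) + 1))
    ([], 0)
  res.1

-- ===== PORT B =====
def get_tok2char_span_map_alt (text : String) : List (Int × Int) :=
  let st := (PySem.List.enumerate text.toList 0).foldl
    (fun (st : List (Int × Int) × Int) (p : Int × Char) =>
      if p.2 = ' ' then (st.1 ++ [(st.2, p.1)], p.1 + 1) else st)
    ([], 0)
  st.1 ++ [(st.2, PySem.Str.len text)]

-- ===== PRECONDITION & SPEC =====
def Spec_get_tok2char_span_map (text : String) (out : List (Int × Int)) : Prop := out = get_tok2char_span_map_alt text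
instance (text : String) (out : List (Int × Int)) : Decidable (Spec_get_tok2char_span_map text out) := by unfold Spec_get_tok2char_span_map; infer_instance

-- ===== CLAIM (what is proved, stated in full; the proofs are below) =====
def Claim_equal_get_tok2char_span_map : Prop := ∀ (text : String), Dom_get_tok2char_span_map text → Spec_get_tok2char_span_map text (get_tok2char_span_map text)

-- ===== LEMMAS AND PROOFS =====

-- split(" ") on a char list, as plain structural recursion (proved equal to PySem.Chars.splitOn below)
def mySplit : List Char → List (List Char)
  | [] => [[]]
  | c :: rest =>
    if c = ' ' then [] :: mySplit rest
    else
      match mySplit rest with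
      | [] => [[c]]
      | t :: ts => (c :: t) :: ts

lemma mySplit_ne_nil (cs : List Char) : mySplit cs ≠ [] := by
  cases cs with
  | nil => simp [mySplit]
  | cons c rest =>
    simp only [mySplit]
    split
    · simp
    · cases h : mySplit rest <;> simp

lemma go_eq_mySplit (fuel : Nat) (l cur : List Char) (acc : List (List Char))
    (h : l.length < fuel) :
    PySem.Chars.splitOn.go [' '] fuel l cur acc =
      acc.reverse ++
        (match mySplit l with
         | [] => [cur.reverse]
         | t :: ts => (cur.reverse ++ t) :: ts) := by
  induction fuel generalizing l cur acc with
  | zero => omega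
  | succ fuel ih =>
    cases l with
    | nil =>
      rw [PySem.Chars.splitOn.go]
      · simp [mySplit]
      · omega
    | cons c rest =>
      rw [PySem.Chars.splitOn.go]
      by_cases hc : c = ' '
      · have hpre : [' '].isPrefixOf (c :: rest) = true := by simp [hc]
        rw [if_pos hpre]
        have hd : List.drop [' '].length (c :: rest) = rest := by simp
        rw [hd, ih rest [] (cur.reverse :: acc) (by simp at h ⊢; omega)]
        have hms : mySplit (c :: rest) = [] :: mySplit rest := by simp [mySplit, hc]
        rw [hms]
        cases hrest : mySplit rest with
        | nil => exact absurd hrest (mySplit_ne_nil rest)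
        | cons t ts => simp
      · have hpre : [' '].isPrefixOf (c :: rest) = false := by
          simp [List.isPrefixOf]
          exact fun hcc => hc hcc.symm
        rw [if_neg (by simp [hpre])]
        rw [ih rest (c :: cur) acc (by simp at h ⊢; omega)]
        cases hrest : mySplit rest with
        | nil => exact absurd hrest (mySplit_ne_nil rest)
        | cons t ts =>
          have hms : mySplit (c :: rest) = (c :: t) :: ts := by simp [mySplit, hc, hrest]
          rw [hms]
          simp

lemma splitOn_eq_mySplit (cs : List Char) :
    PySem.Chars.splitOn cs [' '] = mySplit cs := by
  rw [PySem.Chars.splitOn, go_eq_mySplit cs.length.succ cs [] [] (by omega)]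
  cases h : mySplit cs with
  | nil => exact absurd h (mySplit_ne_nil cs)
  | cons t ts => simp

-- the spans A's loop emits for a token list, starting at offset n
def spansA (n : Int) : List (List Char) → List (Int × Int)
  | [] => []
  | t :: ts => (n, n + (t.length : Int)) :: spansA (n + (t.length : Int) + 1) ts

-- the spans B's scan emits (including the trailing one); start offset, current index
def gB (start s : Int) : List Char → List (Int × Int)
  | [] => [(start, s)]
  | c :: rest => if c = ' ' then (start, s) :: gB (s + 1) (s + 1) rest else gB start (s + 1) rest

lemma foldA (toks : List (List Char)) (acc : List (Int × Int)) (n : Int) :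
    (toks.foldl
      (fun (st : List (Int × Int) × Int) tok =>
        (st.1 ++ [(st.2, st.2 + (tok.length : Int))], st.2 + (tok.length : Int) + 1))
      (acc, n)).1 = acc ++ spansA n toks := by
  induction toks generalizing acc n with
  | nil => simp [spansA]
  | cons t ts ih => simp [List.foldl, ih, spansA]

lemma foldB (cs : List Char) (s : Int) (acc : List (Int × Int)) (start : Int) :
    ((PySem.List.enumerate cs s).foldl
        (fun (st : List (Int × Int) × Int) (p : Int × Char) =>
          if p.2 = ' ' then (st.1 ++ [(st.2, p.1)], p.1 + 1) else st)
        (acc, start)).1 ++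
      [(((PySem.List.enumerate cs s).foldl
        (fun (st : List (Int × Int) × Int) (p : Int × Char) =>
          if p.2 = ' ' then (st.1 ++ [(st.2, p.1)], p.1 + 1) else st)
        (acc, start)).2, s + (cs.length : Int))] = acc ++ gB start s cs := by
  induction cs generalizing s acc start with
  | nil => simp [PySem.List.enumerate_nil, gB]
  | cons c rest ih =>
    rw [PySem.List.enumerate_cons, List.foldl_cons]
    have hlen : s + ((c :: rest).length : Int) = (s + 1) + (rest.length : Int) := by
      simp; ring
    rw [hlen]
    by_cases hc : c = ' '
    · have hinit : (if ((s, c) : Int × Char).2 = ' '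
            then ((acc, start).1 ++ [((acc, start).2, ((s, c) : Int × Char).1)], ((s, c) : Int × Char).1 + 1)
            else ((acc, start) : List (Int × Int) × Int)) = (acc ++ [(start, s)], s + 1) := by
        simp [hc]
      rw [hinit, ih (s + 1) (acc ++ [(start, s)]) (s + 1)]
      simp [gB, hc]
    · have hinit : (if ((s, c) : Int × Char).2 = ' '
            then ((acc, start).1 ++ [((acc, start).2, ((s, c) : Int × Char).1)], ((s, c) : Int × Char).1 + 1)
            else ((acc, start) : List (Int × Int) × Int)) = (acc, start) := by
        simp [hc]
      rw [hinit, ih (s + 1) acc start]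
      simp [gB, hc]

lemma spansA_mySplit (cs : List Char) (t : List Char) (ts : List (List Char))
    (h : mySplit cs = t :: ts) (start s : Int) :
    gB start s cs = (start, s + (t.length : Int)) :: spansA (s + (t.length : Int) + 1) ts := by
  induction cs generalizing t ts start s with
  | nil =>
    simp [mySplit] at h
    obtain ⟨h1, h2⟩ := h
    subst h1; subst h2
    simp [gB, spansA]
  | cons c rest ih =>
    by_cases hc : c = ' '
    · have hms : mySplit (c :: rest) = [] :: mySplit rest := by simp [mySplit, hc]
      rw [hms] at h
      injection h with h1 h2
      subst h1
      cases hrest : mySplit rest with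
      | nil => exact absurd hrest (mySplit_ne_nil rest)
      | cons t' ts' =>
        rw [gB, if_pos hc, ih t' ts' hrest (s + 1) (s + 1), ← h2, hrest]
        simp [spansA]
    · cases hrest : mySplit rest with
      | nil => exact absurd hrest (mySplit_ne_nil rest)
      | cons t' ts' =>
        have hms : mySplit (c :: rest) = (c :: t') :: ts' := by simp [mySplit, hc, hrest]
        rw [hms] at h
        injection h with h1 h2
        subst h1; subst h2
        rw [gB, if_neg hc, ih t' ts' hrest start (s + 1)]
        have hl : ((c :: t').length : Int) = (t'.length : Int) + 1 := by push_cast [List.length_cons]; ring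
        rw [hl]
        rw [show s + 1 + (t'.length : Int) = s + ((t'.length : Int) + 1) from by ring]

lemma main_eq (cs : List Char) : spansA 0 (mySplit cs) = gB 0 0 cs := by
  cases h : mySplit cs with
  | nil => exact absurd h (mySplit_ne_nil cs)
  | cons t ts => rw [spansA_mySplit cs t ts h 0 0, spansA]

-- ===== VERDICT (by name: the statement is the Claim_ definition above) =====
theorem get_tok2char_span_map_spec : Claim_equal_get_tok2char_span_map := by
  intro text _
  show get_tok2char_span_map text = get_tok2char_span_map_alt text
  unfold get_tok2char_span_map get_tok2char_span_map_alt
  simp only [splitOn_eq_mySplit, PySem.Str.len_eq]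
  rw [foldA, main_eq]
  have hB := foldB text.toList 0 [] 0
  simp only [zero_add, List.nil_append] at hB
  exact hB.symm
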